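-- pv_equiv track=rewrite | github.com/The-cute-cat/CareerAgent | career-planning-ai/src/ai_service/utils/json_fixer.py | extract_json_arrays
-- ===== SOURCE A (Python) =====
-- from typing import Tuple, List, Dict, Any, Optional, Union
--
-- def extract_json_arrays(content: str) -> List[str]:
--     """提取所有完整的 JSON 数组"""
--     arrays = []
--     depth = 0
--     start = -1
--     in_string = False
--     escape_next = False
--
--     for i, char in enumerate(content):
--         if escape_next:
--             escape_next = False
--             continue
--
--         if char == '\\' and in_string:
--             escape_next = True
--             continue
--
--         if char == '"' and not escape_next:
--             in_string = not in_string
--             continue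
--
--         if not in_string:
--             if char == '[':
--                 if depth == 0:
--                     start = i
--                 depth += 1
--             elif char == ']':
--                 depth -= 1
--                 if depth == 0 and start != -1:
--                     arrays.append(content[start:i + 1])
--                     start = -1
--
--     return arrays
-- ===== SOURCE B (Python) =====
-- def extract_json_arrays(content):
--     """Two-pass: first mark positions outside string literals, then scan brackets."""
--     # pass 1: outside[i] == True iff position i is outside a JSON string literal
--     outside = []
--     in_string = False
--     escape_next = False
--     for ch in content:
--         if escape_next:
--             outside.append(False)
--             escape_next = False
--         elif ch == '\\' and in_string:
--             outside.append(False)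
--             escape_next = True
--         elif ch == '"':
--             outside.append(False)
--             in_string = not in_string
--         else:
--             outside.append(not in_string)
--     # pass 2: bracket matching restricted to outside-string positions
--     arrays = []
--     depth = 0
--     start = -1
--     for i, ch in enumerate(content):
--         if not outside[i]:
--             continue
--         if ch == '[':
--             if depth == 0:
--                 start = i
--             depth += 1
--         elif ch == ']':
--             depth -= 1
--             if depth == 0 and start != -1:
--                 arrays.append(content[start:i + 1])
--                 start = -1
--     return arrays
-- ===== Notes on version B (the rewrite author's own statement) =====
-- stated objective: simpler
-- what changed: A's single five-variable loop (escape/string state fused with bracket matching) is split into two independent passes: first a boolean mask of positions outside string literals, then a plain depth/start bracket scan restricted to masked positions.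
import Mathlib
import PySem

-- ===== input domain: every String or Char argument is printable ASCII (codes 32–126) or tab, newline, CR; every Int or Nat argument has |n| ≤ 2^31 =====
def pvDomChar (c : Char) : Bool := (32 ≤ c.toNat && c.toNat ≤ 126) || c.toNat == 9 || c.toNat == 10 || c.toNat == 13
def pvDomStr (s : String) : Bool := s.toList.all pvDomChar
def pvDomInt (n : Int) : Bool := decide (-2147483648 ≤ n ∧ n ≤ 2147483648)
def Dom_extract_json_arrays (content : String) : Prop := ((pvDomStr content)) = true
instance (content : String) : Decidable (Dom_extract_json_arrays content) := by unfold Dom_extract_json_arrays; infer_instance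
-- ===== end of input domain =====

-- B replaces A's fused five-state loop by two passes: an outside-string mask, then a plain bracket scan (objective: simpler decomposition, same cost).

-- ===== PORT A =====
-- single fused loop over the characters, state (escape_next, in_string, depth, start, arrays)
def pvGoA (full : List Char) : List Char → Nat → Bool → Bool → Int → Int → List String → List String
  | [], _, _, _, _, _, arrays => arrays
  | c :: cs, i, esc, instr, depth, start, arrays =>
    if esc = true then
      pvGoA full cs (i + 1) false instr depth start arrays
    else if c = '\\' ∧ instr = true then
      pvGoA full cs (i + 1) true instr depth start arrays
    else if c = '"' ∧ esc = false then
      pvGoA full cs (i + 1) esc (!instr) depth start arrays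
    else if instr = false then
      if c = '[' then
        pvGoA full cs (i + 1) esc instr (depth + 1) (if depth = 0 then (i : Int) else start) arrays
      else if c = ']' then
        if depth - 1 = 0 ∧ start ≠ -1 then
          pvGoA full cs (i + 1) esc instr (depth - 1) (-1)
            (arrays ++ [String.ofList (PySem.List.slice full (some start) (some ((i : Int) + 1)))])
        else
          pvGoA full cs (i + 1) esc instr (depth - 1) start arrays
      else
        pvGoA full cs (i + 1) esc instr depth start arrays
    else
      pvGoA full cs (i + 1) esc instr depth start arrays

def extract_json_arrays (content : String) : List String :=
  pvGoA content.toList content.toList 0 false false 0 (-1) []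

-- ===== PORT B =====
-- pass 1: outside-string mask (True = position lies outside a string literal)
def pvMask : List Char → Bool → Bool → List Bool
  | [], _, _ => []
  | c :: cs, esc, instr =>
    if esc = true then false :: pvMask cs false instr
    else if c = '\\' ∧ instr = true then false :: pvMask cs true instr
    else if c = '"' then false :: pvMask cs esc (!instr)
    else (!instr) :: pvMask cs esc instr

-- pass 2: bracket scan over (mask, char) pairs, state (depth, start, arrays)
def pvGoB (full : List Char) : List (Bool × Char) → Nat → Int → Int → List String → List String
  | [], _, _, _, arrays => arrays
  | (ok, c) :: rest, i, depth, start, arrays =>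
    if ok = false then
      pvGoB full rest (i + 1) depth start arrays
    else if c = '[' then
      pvGoB full rest (i + 1) (depth + 1) (if depth = 0 then (i : Int) else start) arrays
    else if c = ']' then
      if depth - 1 = 0 ∧ start ≠ -1 then
        pvGoB full rest (i + 1) (depth - 1) (-1)
          (arrays ++ [String.ofList (PySem.List.slice full (some start) (some ((i : Int) + 1)))])
      else
        pvGoB full rest (i + 1) (depth - 1) start arrays
    else
      pvGoB full rest (i + 1) depth start arrays

def extract_json_arrays_alt (content : String) : List String :=
  pvGoB content.toList ((pvMask content.toList false false).zip content.toList) 0 0 (-1) []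

-- ===== PRECONDITION & SPEC =====
def Spec_extract_json_arrays (content : String) (out : List String) : Prop := out = extract_json_arrays_alt content
instance (content : String) (out : List String) : Decidable (Spec_extract_json_arrays content out) := by unfold Spec_extract_json_arrays; infer_instance

-- ===== CLAIM (what is proved, stated in full; the proofs are below) =====
def Claim_equal_extract_json_arrays : Prop := ∀ (content : String), Dom_extract_json_arrays content → Spec_extract_json_arrays content (extract_json_arrays content)

-- ===== LEMMAS AND PROOFS =====

theorem pvGoA_eq_goB (full : List Char) (cs : List Char) :
    ∀ (i : Nat) (esc instr : Bool) (depth start : Int) (arrays : List String),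
    pvGoA full cs i esc instr depth start arrays
      = pvGoB full ((pvMask cs esc instr).zip cs) i depth start arrays := by
  induction cs with
  | nil => intro i esc instr depth start arrays; simp [pvGoA, pvMask, pvGoB]
  | cons c cs ih =>
    intro i esc instr depth start arrays
    by_cases hesc : esc = true
    · simp [pvGoA, pvMask, pvGoB, hesc, ih]
    · simp only [Bool.not_eq_true] at hesc
      by_cases hbs : c = '\\' ∧ instr = true
      · simp [pvGoA, pvMask, pvGoB, hesc, hbs, ih]
      · by_cases hq : c = '"'
        · simp [pvGoA, pvMask, pvGoB, hesc, hbs, hq, ih]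
        · cases instr with
          | true =>
            have hb : ¬ c = '\\' := fun h => hbs ⟨h, rfl⟩
            simp [pvGoA, pvMask, pvGoB, hesc, hb, hq, ih]
          | false =>
            by_cases hl : c = '['
            · simp [pvGoA, pvMask, pvGoB, hesc, hbs, hq, hl, ih]
            · by_cases hr : c = ']'
              · by_cases hc : depth - 1 = 0 ∧ start ≠ -1 <;>
                  simp [pvGoA, pvMask, pvGoB, hesc, hbs, hq, hl, hr, hc, ih]
              · simp [pvGoA, pvMask, pvGoB, hesc, hbs, hq, hl, hr, ih]

-- ===== VERDICT (by name: the statement is the Claim_ definition above) =====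
theorem extract_json_arrays_spec : Claim_equal_extract_json_arrays := by
  intro content _
  unfold Spec_extract_json_arrays extract_json_arrays extract_json_arrays_alt
  exact pvGoA_eq_goB content.toList content.toList 0 false false 0 (-1) []
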